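-- pv_equiv track=rewrite | github.com/phil-huynh/Problem-Sets | python/other_py_problems/baby_words.py | check
-- ===== SOURCE A (Python) =====
-- def is_baby_word(s):
--     if len(s) % 2 != 0:
--         return False
--     if s[0:int(len(s)/2)] != s[int(len(s)/2): len(s)]:
--       return False
--     return True
--
-- def check(s):
--     word = ""
--     start = s[0]
--     for i, letter in enumerate(reversed(s)):
--         if is_baby_word(s[0:(len(s) - i)]):
--             temp_w = s[0:(len(s) - i)]
--             if len(temp_w) > len(word):
--                 word = temp_w
--             continue
--     return word
-- ===== SOURCE B (Python) =====
-- def check(s):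
--     n = len(s)
--     z = [0] * n
--     l = r = 0
--     for i in range(1, n):
--         zi = min(r - i, z[i - l]) if i < r else 0
--         while i + zi < n and s[zi] == s[i + zi]:
--             zi += 1
--         z[i] = zi
--         if i + zi > r:
--             l, r = i, i + zi
--     for k in range(n // 2, 0, -1):
--         if z[k] >= k:
--             return s[:2 * k]
--     return ""
-- ===== Notes on version B (the rewrite author's own statement) =====
-- stated objective: faster
-- what changed: B replaces A's per-prefix half-vs-half comparison (an is_baby_word slice test for every prefix length, keeping the longest hit) with the Z-algorithm: one linear pass computes Z[i] = length of the longest common prefix of s and s[i:], and the answer is s[:2k] for the largest k <= n//2 with Z[k] >= k.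
-- outside the precondition, e.g. on check(''): A raises IndexError, B returns ''
import Mathlib
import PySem

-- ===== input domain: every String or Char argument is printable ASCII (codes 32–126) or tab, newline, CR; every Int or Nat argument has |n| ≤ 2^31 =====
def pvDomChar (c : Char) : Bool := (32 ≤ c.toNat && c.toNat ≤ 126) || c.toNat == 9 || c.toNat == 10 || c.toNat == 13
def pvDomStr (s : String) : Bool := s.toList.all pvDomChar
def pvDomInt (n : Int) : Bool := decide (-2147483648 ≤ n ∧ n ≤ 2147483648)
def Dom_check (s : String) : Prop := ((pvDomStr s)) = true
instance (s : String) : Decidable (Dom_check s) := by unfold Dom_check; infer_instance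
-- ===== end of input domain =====

-- B replaces A's per-prefix half-vs-half slice test with the Z-algorithm (one linear pass
-- computing Z[i] = lcp(s, s[i:]); answer = s[:2k] for the largest k ≤ n//2 with Z[k] ≥ k);
-- objective: faster (asymptotic, measured). A raises IndexError on "" (s[0]); Pre_check excludes it.

-- ===== PORT A =====
-- is_baby_word; int(len(s)/2) is exact floor division for any list length, ported as Nat '/'
def pvIsBaby (t : List Char) : Bool :=
  if t.length % 2 ≠ 0 then false
  else if PySem.List.slice t (some 0) (some ((t.length / 2 : Nat) : Int))
          ≠ PySem.List.slice t (some ((t.length / 2 : Nat) : Int)) (some (t.length : Int)) then false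
  else true

def check (s : String) : String :=
  let cs := s.toList
  match PySem.List.pyGet? cs 0 with
  | none => ""   -- Python raises IndexError here (s[0] on empty s); excluded by Pre_check
  | some _start =>
    let word := (PySem.List.enumerate cs.reverse 0).foldl
      (fun word p =>
        if pvIsBaby (PySem.List.slice cs (some 0) (some ((cs.length : Int) - p.1))) then
          let temp := PySem.List.slice cs (some 0) (some ((cs.length : Int) - p.1))
          if temp.length > word.length then temp else word
        else word) []
    String.ofList word

-- ===== PORT B =====
-- the 'while i + zi < n and s[zi] == s[i+zi]: zi += 1' loop; fuel (= len(s) at the call,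
-- each step increases i+m which is bounded by len(s)) only makes the recursion structural.
-- Both indices are guarded in range, so the Option equality is exactly Python's char comparison.
def zExt (cs : List Char) (i : Nat) : Nat → Nat → Nat
  | m, 0 => m
  | m, fuel+1 => if i + m < cs.length ∧ cs[m]? = cs[i + m]? then zExt cs i (m+1) fuel else m

-- one iteration of the 'for i in range(1, n)' loop over the state (z, l, r);
-- the looked-up indices i-l and i are proven in range, so getD/set are exact
def zStep (cs : List Char) (st : List Nat × Nat × Nat) (i : Nat) : List Nat × Nat × Nat :=
  let z := st.1
  let l := st.2.1
  let r := st.2.2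
  let zi := zExt cs i (if i < r then min (r - i) (z.getD (i - l) 0) else 0) cs.length
  let z' := z.set i zi
  if i + zi > r then (z', i, i + zi) else (z', l, r)

-- the 'for k in range(n // 2, 0, -1)' loop with its early return
def zFind (z : List Nat) : Nat → Option Nat
  | 0 => none
  | k+1 => if z.getD (k+1) 0 ≥ k+1 then some (k+1) else zFind z k

def check_alt (s : String) : String :=
  let cs := s.toList
  let z := ((List.range' 1 (cs.length - 1)).foldl (zStep cs) (List.replicate cs.length 0, 0, 0)).1
  match zFind z (cs.length / 2) with
  | some k => String.ofList (PySem.List.slice cs none (some ((2 * k : Nat) : Int)))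
  | none => ""

-- ===== PRECONDITION & SPEC =====
-- A evaluates s[0] before its loop, so it raises IndexError exactly on the empty string.
def Pre_check (s : String) : Prop := s ≠ ""
instance (s : String) : Decidable (Pre_check s) := by unfold Pre_check; infer_instance
def pvWitness_check : String := "abab"

def Spec_check (s : String) (out : String) : Prop := out = check_alt s
instance (s : String) (out : String) : Decidable (Spec_check s out) := by unfold Spec_check; infer_instance

-- ===== CLAIM (what is proved, stated in full; the proofs are below) =====
def Claim_equal_check : Prop := ∀ (s : String), Dom_check s → Pre_check s → Spec_check s (check s)

-- ===== LEMMAS AND PROOFS =====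

-- ---- characterisation of A: the longest half-length k with matching halves ----

def pvHalvesEq (cs : List Char) (k : Nat) : Bool :=
  (List.range k).all (fun i => cs[i]? == cs[k + i]?)

def pvFindK (cs : List Char) : Nat → Option Nat
  | 0 => none
  | k + 1 => if pvHalvesEq cs (k + 1) then some (k + 1) else pvFindK cs k

-- A's per-prefix test, seen on the prefix of even length 2k, is the half comparison
lemma pvIsBaby_take_even (cs : List Char) (k : Nat) (h : 2 * k ≤ cs.length) :
    pvIsBaby (cs.take (2 * k)) = pvHalvesEq cs k := by
  have hlen : (cs.take (2 * k)).length = 2 * k := by simp; omega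
  have h2 : (2 * k) / 2 = k := by omega
  unfold pvIsBaby pvHalvesEq
  rw [hlen, h2]
  have e1 : PySem.List.slice (cs.take (2 * k)) (some 0) (some ((k : Nat) : Int))
      = cs.take k := by
    have h4 := PySem.List.slice_natCast (cs.take (2 * k)) 0 k
    simp only [Nat.cast_zero, Nat.sub_zero, List.drop_zero] at h4
    rw [h4, List.take_take]
    congr 1
    omega
  have e2 : PySem.List.slice (cs.take (2 * k)) (some ((k : Nat) : Int)) (some ((2 * k : Nat) : Int))
      = (cs.drop k).take k := by
    have := PySem.List.slice_natCast (cs.take (2 * k)) k (2 * k)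
    rw [this, List.drop_take, List.take_take]
    congr 1
    omega
  rw [e1, e2]
  simp only [if_neg (by omega : ¬ (2 * k) % 2 ≠ 0)]
  by_cases heq : cs.take k = (cs.drop k).take k
  · simp only [heq, ne_eq, not_true_eq_false, if_false]
    symm
    rw [List.all_eq_true]
    intro i hi
    rw [List.mem_range] at hi
    have h1 : i < cs.length := by omega
    have h3 : k + i < cs.length := by omega
    simp [h1, h3]
    calc cs[i] = (List.take k cs)[i]'(by simp; omega) := List.getElem_take.symm
      _ = (List.take k (List.drop k cs))[i]'(by simp; omega) := by simp only [heq]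
      _ = cs[k + i] := by rw [List.getElem_take, List.getElem_drop]
  · simp only [ne_eq, heq, not_false_eq_true, if_true]
    symm
    rw [Bool.eq_false_iff]
    intro hall
    apply heq
    rw [List.all_eq_true] at hall
    apply List.ext_getElem
    · simp; omega
    · intro i hi hi2
      have hik : i < k := by simp at hi; omega
      have := hall i (List.mem_range.mpr hik)
      have h1 : i < cs.length := by omega
      have h3 : k + i < cs.length := by omega
      simp [h1, h3] at this
      rw [List.getElem_take, List.getElem_take, List.getElem_drop]
      exact this

lemma pvIsBaby_take_odd (cs : List Char) (L : Nat) (hL : L ≤ cs.length) (hodd : L % 2 = 1) :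
    pvIsBaby (cs.take L) = false := by
  unfold pvIsBaby
  have hlen : (cs.take L).length = L := by simp; omega
  rw [hlen]
  simp [hodd]

-- A's descending scan over prefix lengths, as a recursion
def pvGoodDown (cs : List Char) : Nat → Option Nat
  | 0 => none
  | L + 1 => if pvIsBaby (cs.take (L + 1)) then some (L + 1) else pvGoodDown cs L

lemma pvGoodDown_eq_findK (cs : List Char) : ∀ L, L ≤ cs.length →
    pvGoodDown cs L = (pvFindK cs (L / 2)).map (fun k => 2 * k) := by
  intro L
  induction L with
  | zero => intro _; simp [pvGoodDown, pvFindK]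
  | succ L ih =>
    intro hL
    show (if pvIsBaby (cs.take (L + 1)) then some (L + 1) else pvGoodDown cs L) = _
    rcases Nat.even_or_odd (L + 1) with he | ho
    · obtain ⟨k, hk⟩ := he
      have hdiv : (L + 1) / 2 = L / 2 + 1 := by omega
      have hb : pvIsBaby (cs.take (L + 1)) = pvHalvesEq cs (L / 2 + 1) := by
        have h2 : 2 * (L / 2 + 1) = L + 1 := by omega
        have h3 := pvIsBaby_take_even cs (L / 2 + 1) (by omega)
        rwa [h2] at h3
      rw [hdiv, hb]
      show _ = (if pvHalvesEq cs (L / 2 + 1) then some (L / 2 + 1) else pvFindK cs (L / 2)).map _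
      by_cases hcase : pvHalvesEq cs (L / 2 + 1)
      · rw [if_pos hcase, if_pos hcase, Option.map_some]
        congr 1
        omega
      · rw [if_neg hcase, if_neg hcase, ih (by omega)]
    · have hodd : (L + 1) % 2 = 1 := Nat.odd_iff.mp ho
      rw [pvIsBaby_take_odd cs (L + 1) hL hodd]
      rw [if_neg (by simp)]
      rw [ih (by omega)]
      have h4 : L / 2 = (L + 1) / 2 := by omega
      rw [h4]

-- the Nat-level body of A's loop
def pvStep (cs : List Char) (w : List Char) (j : Nat) : List Char :=
  if pvIsBaby (cs.take (cs.length - j)) then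
    if cs.length - j > w.length then cs.take (cs.length - j) else w
  else w

lemma pvFold_no_update (cs : List Char) : ∀ (l : List Nat) (w : List Char),
    (∀ j ∈ l, cs.length - j ≤ w.length) → l.foldl (pvStep cs) w = w := by
  intro l
  induction l with
  | nil => intro w _; rfl
  | cons j t ih =>
    intro w hw
    have hj := hw j (by simp)
    show List.foldl (pvStep cs) (pvStep cs w j) t = w
    have : pvStep cs w j = w := by
      unfold pvStep
      split
      · rw [if_neg (by omega)]
      · rfl
    rw [this]
    exact ih w (fun j' hj' => hw j' (by simp [hj']))

lemma pvFold_main (cs : List Char) : ∀ (m j : Nat), j + m = cs.length →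
    (List.range' j m).foldl (pvStep cs) [] = (pvGoodDown cs m).elim [] (fun L => cs.take L) := by
  intro m
  induction m with
  | zero => intro j _; simp [pvGoodDown]
  | succ m ih =>
    intro j hj
    have hnj : cs.length - j = m + 1 := by omega
    have h0 : pvStep cs [] j = if pvIsBaby (cs.take (m + 1)) then cs.take (m + 1) else [] := by
      unfold pvStep
      rw [hnj]
      by_cases hb : pvIsBaby (cs.take (m + 1))
      · rw [if_pos hb, if_pos hb, if_pos (by simp)]
      · rw [if_neg hb, if_neg hb]
    rw [List.range'_succ, List.foldl_cons, h0]
    by_cases hb : pvIsBaby (cs.take (m + 1))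
    · rw [if_pos hb]
      have hw : (cs.take (m + 1)).length = m + 1 := by simp; omega
      rw [pvFold_no_update cs _ _ (by
        intro j' hj'
        rw [List.mem_range'] at hj'
        omega)]
      show _ = (if pvIsBaby (cs.take (m + 1)) then some (m + 1) else pvGoodDown cs m).elim [] _
      rw [if_pos hb]
      rfl
    · rw [if_neg hb, ih (j + 1) (by omega)]
      show _ = (if pvIsBaby (cs.take (m + 1)) then some (m + 1) else pvGoodDown cs m).elim [] _
      rw [if_neg hb]

-- A's enumerate-fold is the Nat-level fold over the index range
lemma pvFoldA_eq (cs : List Char) :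
    (PySem.List.enumerate cs.reverse 0).foldl
      (fun word p =>
        if pvIsBaby (PySem.List.slice cs (some 0) (some ((cs.length : Int) - p.1))) then
          let temp := PySem.List.slice cs (some 0) (some ((cs.length : Int) - p.1))
          if temp.length > word.length then temp else word
        else word) []
    = (List.range cs.length).foldl (pvStep cs) [] := by
  set F : List Char → Int → List Char := fun word i =>
    if pvIsBaby (PySem.List.slice cs (some 0) (some ((cs.length : Int) - i))) then
      let temp := PySem.List.slice cs (some 0) (some ((cs.length : Int) - i))
      if temp.length > word.length then temp else word
    else word with hF
  have h1 : (PySem.List.enumerate cs.reverse 0).foldl (fun word p => F word p.1) []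
      = ((PySem.List.enumerate cs.reverse 0).map (fun p => p.1)).foldl F [] := by
    rw [List.foldl_map]
  rw [show (PySem.List.enumerate cs.reverse 0).foldl
      (fun word p =>
        if pvIsBaby (PySem.List.slice cs (some 0) (some ((cs.length : Int) - p.1))) then
          let temp := PySem.List.slice cs (some 0) (some ((cs.length : Int) - p.1))
          if temp.length > word.length then temp else word
        else word) [] = (PySem.List.enumerate cs.reverse 0).foldl (fun word p => F word p.1) [] from rfl]
  rw [h1, PySem.List.map_fst_enumerate]
  have h2 : PySem.List.pyRange 0 (0 + (cs.reverse.length : Int)) = PySem.List.pyRange 0 (cs.length : Int) := by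
    simp
  rw [h2, PySem.List.pyRange_zero_natCast, List.foldl_map]
  apply PySem.List.foldl_congr_mem
  intro w j hj
  rw [List.mem_range] at hj
  rw [hF]
  have hcast : (cs.length : Int) - (j : Int) = ((cs.length - j : Nat) : Int) := by omega
  simp only [hcast]
  have hsl : PySem.List.slice cs (some 0) (some ((cs.length - j : Nat) : Int))
      = cs.take (cs.length - j) := by
    have h5 := PySem.List.slice_natCast cs 0 (cs.length - j)
    simp only [Nat.cast_zero, Nat.sub_zero, List.drop_zero] at h5
    exact h5
  rw [hsl]
  unfold pvStep
  rw [show (List.take (cs.length - j) cs).length = cs.length - j from by simp]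

lemma check_nonempty (s : String) (h : s.toList ≠ []) :
    check s = String.ofList ((pvGoodDown s.toList s.toList.length).elim [] (fun L => s.toList.take L)) := by
  unfold check
  obtain ⟨c, t, hct⟩ := List.exists_cons_of_ne_nil h
  rw [hct]
  show (match PySem.List.pyGet? (c :: t) 0 with
    | none => ""
    | some _ => _) = _
  rw [show PySem.List.pyGet? (c :: t) 0 = some c by simp [PySem.List.pyGet?, PySem.List.pyIdx?]]
  show String.ofList _ = _
  rw [← hct]
  rw [pvFoldA_eq]
  rw [List.range_eq_range']
  rw [pvFold_main s.toList s.toList.length 0 (by omega)]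

-- ---- correctness of B's Z pass: z[j] = Lcp j ----

-- "position j still matches when s is compared with s shifted by i"
def zC (cs : List Char) (i j : Nat) : Prop := i + j < cs.length ∧ cs[j]? = cs[i + j]?

-- the true longest-common-prefix value: the while loop started from 0 with full fuel
def Lcp (cs : List Char) (i : Nat) : Nat := zExt cs i 0 cs.length

lemma zExt_matched (cs : List Char) (i : Nat) : ∀ (fuel m j : Nat), m ≤ j →
    j < zExt cs i m fuel → zC cs i j := by
  intro fuel
  induction fuel with
  | zero => intro m j hmj hj; simp [zExt] at hj; omega
  | succ fuel ih =>
    intro m j hmj hj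
    rw [zExt] at hj
    split at hj
    · rename_i hc
      rcases Nat.lt_or_ge j (m + 1) with h | h
      · have : j = m := by omega
        subst this; exact hc
      · exact ih (m + 1) j h hj
    · omega

lemma zExt_stop (cs : List Char) (i : Nat) : ∀ (fuel m : Nat),
    cs.length - (i + m) ≤ fuel → ¬ zC cs i (zExt cs i m fuel) := by
  intro fuel
  induction fuel with
  | zero =>
    intro m hfuel
    simp only [zExt]
    intro hc
    exact absurd hc.1 (by omega)
  | succ fuel ih =>
    intro m hfuel
    rw [zExt]
    split
    · rename_i hc
      exact ih (m + 1) (by omega)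
    · rename_i hc
      exact hc

lemma zStop_unique (cs : List Char) (i u v : Nat)
    (hu1 : ∀ j < u, zC cs i j) (hu2 : ¬ zC cs i u)
    (hv1 : ∀ j < v, zC cs i j) (hv2 : ¬ zC cs i v) : u = v := by
  rcases Nat.lt_trichotomy u v with h | h | h
  · exact absurd (hv1 u h) hu2
  · exact h
  · exact absurd (hu1 v h) hv2

lemma lcp_matched (cs : List Char) (i : Nat) : ∀ j < Lcp cs i, zC cs i j :=
  fun j hj => zExt_matched cs i cs.length 0 j (Nat.zero_le j) hj

lemma lcp_stop (cs : List Char) (i : Nat) : ¬ zC cs i (Lcp cs i) :=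
  zExt_stop cs i cs.length 0 (by omega)

lemma zExt_eq_lcp (cs : List Char) (i m : Nat) (h : ∀ j < m, zC cs i j) :
    zExt cs i m cs.length = Lcp cs i := by
  apply zStop_unique cs i _ _ _ (zExt_stop cs i cs.length m (by omega))
    (lcp_matched cs i) (lcp_stop cs i)
  intro j hj
  rcases Nat.lt_or_ge j m with hjm | hjm
  · exact h j hjm
  · exact zExt_matched cs i cs.length m j hjm hj

lemma le_lcp_iff (cs : List Char) (i m : Nat) :
    m ≤ Lcp cs i ↔ ∀ j < m, zC cs i j := by
  constructor
  · intro h j hj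
    exact lcp_matched cs i j (by omega)
  · intro h
    by_contra hlt
    exact lcp_stop cs i (h (Lcp cs i) (by omega))

lemma zWindow (cs : List Char) (l i r : Nat) (hl : l < i) (hi : i < r)
    (hr : r ≤ l + Lcp cs l) : min (r - i) (Lcp cs (i - l)) ≤ Lcp cs i := by
  rw [le_lcp_iff]
  intro j hj
  have hj1 : j < r - i := by omega
  have hj2 : j < Lcp cs (i - l) := by omega
  have hc1 := lcp_matched cs (i - l) j hj2
  have hc2 := lcp_matched cs l (i - l + j) (by omega)
  constructor
  · have := hc2.1; omega
  · have e2 : l + (i - l + j) = i + j := by omega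
    have h22 := hc2.2
    rw [e2] at h22
    rw [hc1.2, h22]

-- the loop invariant: l < i, the window [l, r) really matches, processed entries hold Lcp
def zInv (cs : List Char) (i : Nat) (st : List Nat × Nat × Nat) : Prop :=
  st.1.length = cs.length ∧ st.2.1 < i ∧ st.2.2 ≤ st.2.1 + Lcp cs st.2.1 ∧
  (st.2.2 = 0 ∨ 1 ≤ st.2.1) ∧
  (∀ j, 1 ≤ j → j < i → st.1.getD j 0 = Lcp cs j)

lemma zStep_inv (cs : List Char) (i : Nat) (st : List Nat × Nat × Nat)
    (h : zInv cs i st) (h1 : 1 ≤ i) (h2 : i < cs.length) :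
    zInv cs (i + 1) (zStep cs st i) := by
  obtain ⟨hlen, hli, hwin, hl1, hz⟩ := h
  obtain ⟨z, l, r⟩ := st
  simp only at hlen hli hwin hl1 hz
  have hm0 : (if i < r then min (r - i) (z.getD (i - l) 0) else 0) ≤ Lcp cs i := by
    split
    · rename_i hir
      have hl1' : 1 ≤ l := by omega
      have hil1 : 1 ≤ i - l := by omega
      have hiln : i - l < i := by omega
      rw [hz (i - l) hil1 hiln]
      exact zWindow cs l i r hli hir hwin
    · exact Nat.zero_le _
  have hzi : zExt cs i (if i < r then min (r - i) (z.getD (i - l) 0) else 0) cs.length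
      = Lcp cs i := by
    apply zExt_eq_lcp
    intro j hj
    exact lcp_matched cs i j (by omega)
  unfold zStep
  simp only [hzi]
  have hset_len : (z.set i (Lcp cs i)).length = cs.length := by simp [hlen]
  have hset_get : ∀ j, 1 ≤ j → j < i + 1 → (z.set i (Lcp cs i)).getD j 0 = Lcp cs j := by
    intro j hj1 hj2
    rcases Nat.lt_or_ge j i with hji | hji
    · rw [List.getD, List.getElem?_set_ne (by omega)]
      exact hz j hj1 hji
    · have : j = i := by omega
      subst this
      rw [List.getD, List.getElem?_set_self (by omega)]
      rfl
  split
  · exact ⟨hset_len, by show i < i + 1; omega, by show i + Lcp cs i ≤ i + Lcp cs i; omega,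
      Or.inr (by show 1 ≤ i; omega), hset_get⟩
  · rename_i hnr
    exact ⟨hset_len, by show l < i + 1; omega, hwin, hl1, hset_get⟩

lemma zFold_inv (cs : List Char) : ∀ (m i : Nat) (st : List Nat × Nat × Nat),
    zInv cs i st → 1 ≤ i → i + m ≤ cs.length →
    zInv cs (i + m) ((List.range' i m).foldl (zStep cs) st) := by
  intro m
  induction m with
  | zero => intro i st h _ _; simpa using h
  | succ m ih =>
    intro i st h h1 h2
    rw [List.range'_succ, List.foldl_cons]
    have := ih (i + 1) (zStep cs st i) (zStep_inv cs i st h h1 (by omega)) (by omega) (by omega)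
    have e : i + (m + 1) = i + 1 + m := by omega
    rw [e]
    exact this

lemma z_final (cs : List Char) (h : cs ≠ []) : ∀ j, 1 ≤ j → j < cs.length →
    (((List.range' 1 (cs.length - 1)).foldl (zStep cs)
      (List.replicate cs.length 0, 0, 0)).1).getD j 0 = Lcp cs j := by
  have hn : 1 ≤ cs.length := by
    cases cs with
    | nil => exact absurd rfl h
    | cons a t => simp
  have hinv0 : zInv cs 1 (List.replicate cs.length 0, 0, 0) := by
    refine ⟨by simp, by show (0:Nat) < 1; omega, by show (0:Nat) ≤ 0 + Lcp cs 0; omega,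
      Or.inl rfl, ?_⟩
    intro j hj1 hj2
    omega
  have := zFold_inv cs (cs.length - 1) 1 _ hinv0 (by omega) (by omega)
  rw [show 1 + (cs.length - 1) = cs.length from by omega] at this
  exact this.2.2.2.2

-- ---- the search loops agree ----

lemma halves_iff (cs : List Char) (k : Nat) (hk : 2 * k ≤ cs.length) :
    (k ≤ Lcp cs k) ↔ pvHalvesEq cs k = true := by
  rw [le_lcp_iff]
  unfold pvHalvesEq
  rw [List.all_eq_true]
  constructor
  · intro h j hj
    rw [List.mem_range] at hj
    have := (h j hj).2
    simp [this]
  · intro h j hj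
    have := h j (List.mem_range.mpr hj)
    simp only [beq_iff_eq] at this
    exact ⟨by omega, this⟩

lemma zFind_eq_findK (cs : List Char) (z : List Nat)
    (hz : ∀ j, 1 ≤ j → j < cs.length → z.getD j 0 = Lcp cs j) :
    ∀ k, 2 * k ≤ cs.length → zFind z k = pvFindK cs k := by
  intro k
  induction k with
  | zero => intro _; rfl
  | succ k ih =>
    intro hk
    have hkn : k + 1 < cs.length := by omega
    have hzk : z.getD (k + 1) 0 = Lcp cs (k + 1) := hz (k + 1) (by omega) hkn
    show (if z.getD (k+1) 0 ≥ k+1 then some (k+1) else zFind z k)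
      = (if pvHalvesEq cs (k+1) then some (k+1) else pvFindK cs k)
    rw [hzk]
    by_cases hc : k + 1 ≤ Lcp cs (k + 1)
    · rw [if_pos hc, if_pos ((halves_iff cs (k + 1) (by omega)).mp hc)]
    · rw [if_neg hc]
      rw [if_neg (fun hh => hc ((halves_iff cs (k + 1) (by omega)).mpr hh))]
      exact ih (by omega)

lemma check_alt_eq (s : String) (h : s.toList ≠ []) :
    check_alt s = (match pvFindK s.toList (s.toList.length / 2) with
      | some k => String.ofList (PySem.List.slice s.toList none (some ((2 * k : Nat) : Int)))
      | none => "") := by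
  show (match zFind (((List.range' 1 (s.toList.length - 1)).foldl (zStep s.toList)
      (List.replicate s.toList.length 0, 0, 0)).1) (s.toList.length / 2) with
    | some k => String.ofList (PySem.List.slice s.toList none (some ((2 * k : Nat) : Int)))
    | none => "") = _
  rw [zFind_eq_findK s.toList _ (z_final s.toList h) (s.toList.length / 2) (by omega)]

-- ===== VERDICT (by name: the statement is the Claim_ definition above) =====
theorem check_spec : Claim_equal_check := by
  intro s _ hpre
  unfold Spec_check
  have hne : s.toList ≠ [] := by
    intro hnil
    apply hpre
    have := congrArg String.ofList hnil
    simpa using this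
  rw [check_nonempty s hne]
  rw [pvGoodDown_eq_findK s.toList s.toList.length (le_refl _)]
  rw [check_alt_eq s hne]
  cases hfk : pvFindK s.toList (s.toList.length / 2) with
  | none => simp
  | some k =>
    simp only [Option.map_some, Option.elim_some]
    rw [PySem.List.slice_to_natCast]
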